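-- pv_equiv track=rewrite | github.com/enzochristo/DESING-DE-SOFTWARE | academia python/string/detectar_acao.py | detectar_acao
-- ===== SOURCE A (Python) =====
-- def detectar_acao(dic,stop):
--     resp = ''
--     infinitivo = ['ar','er','ir','or']
--     dr = {}
--     l = []
--     for pessoas, dhorarios in dic.items():
--         dr[pessoas] = ''
--         for mensagem in dhorarios.values():
--             lmensagem = mensagem.split()
--             linteresse = []
--             for palavra in lmensagem:
--                 if palavra not in stop:
--                     linteresse.append(palavra)
--             for i in range(len(linteresse)):
--                 if linteresse[i][-2:] in infinitivo:
--                     if i != len(linteresse) -1: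
--                         resp = linteresse[i] + ' ' + linteresse[i+1]
--                     else:
--                         resp = linteresse[i]
--                     l.append(resp)
--         dr[pessoas] = l
--         l = []
--     return dr
-- ===== SOURCE B (Python) =====
-- def detectar_acao(dic, stop):
--     sufixos = ('ar', 'er', 'ir', 'or')
--     dr = {}
--     for pessoa, dhorarios in dic.items():
--         acoes = []
--         for mensagem in dhorarios.values():
--             pendente = None
--             for palavra in mensagem.split():
--                 if palavra in stop:
--                     continue
--                 if pendente is not None:
--                     acoes.append(pendente + ' ' + palavra)
--                     pendente = None
--                 if palavra.endswith(sufixos):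
--                     pendente = palavra
--             if pendente is not None:
--                 acoes.append(pendente)
--         dr[pessoa] = acoes
--     return dr
-- ===== Notes on version B (the rewrite author's own statement) =====
-- stated objective: alternative
-- what changed: A builds a filtered word list per message and then index-scans it with i/i+1 lookups and a last-index test; B makes one forward pass over the message's words with a pending-verb holder, emitting 'verb next-word' when the partner arrives and flushing a trailing lone verb, accumulating straight into the per-person list.
import Mathlib
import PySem

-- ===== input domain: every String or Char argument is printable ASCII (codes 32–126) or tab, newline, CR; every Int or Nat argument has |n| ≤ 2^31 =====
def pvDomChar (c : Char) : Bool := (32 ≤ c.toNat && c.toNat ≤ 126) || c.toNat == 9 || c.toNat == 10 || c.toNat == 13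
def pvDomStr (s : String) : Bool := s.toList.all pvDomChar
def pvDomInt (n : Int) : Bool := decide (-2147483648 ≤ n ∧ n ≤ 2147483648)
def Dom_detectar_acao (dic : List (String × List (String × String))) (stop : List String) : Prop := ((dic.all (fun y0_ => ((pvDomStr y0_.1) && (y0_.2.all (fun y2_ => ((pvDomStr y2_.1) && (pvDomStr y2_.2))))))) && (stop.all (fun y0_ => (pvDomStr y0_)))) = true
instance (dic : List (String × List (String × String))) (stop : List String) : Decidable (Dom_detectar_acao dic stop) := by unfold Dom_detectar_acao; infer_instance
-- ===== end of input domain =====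

-- B replaces A's per-message "filter the stopwords into a list, then index-scan it with i/i+1
-- lookups" by a single forward pass with a pending-verb holder; same return value.

-- ===== PORT A =====
def infinitivoA : List String := ["ar", "er", "ir", "or"]

-- the loop 'for i in range(len(linteresse)): ...'; i is always in range, so pyGetD with "" is exact
def idxLoopA (linteresse : List String) (st : String × List String) : String × List String :=
  (PySem.List.pyRange 0 (linteresse.length : Int) 1).foldl (fun st i =>
    if PySem.Str.slice (PySem.List.pyGetD linteresse i "") (some (-2)) none ∈ infinitivoA then
      let resp := if i ≠ (linteresse.length : Int) - 1 then
          PySem.List.pyGetD linteresse i "" ++ " " ++ PySem.List.pyGetD linteresse (i + 1) ""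
        else PySem.List.pyGetD linteresse i ""
      (resp, st.2 ++ [resp])
    else st) st

-- the body of 'for mensagem in dhorarios.values(): ...'; state = (resp, l)
def msgLoopA (stop : List String) (st : String × List String) (mensagem : String) : String × List String :=
  let lmensagem := PySem.Str.split₀ mensagem
  let linteresse := lmensagem.foldl (fun acc palavra => if palavra ∉ stop then acc ++ [palavra] else acc) []
  idxLoopA linteresse st

def detectar_acao (dic : List (String × List (String × String))) (stop : List String) : List (String × List String) :=
  -- state = (resp, dr, l)
  let st := (PySem.Dict.ofList dic).items.foldl
    (fun (st : String × PySem.Dict String (List String) × List String) pd =>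
      -- Python: dr[pessoas] = '' stores a str placeholder that is never read and is overwritten
      -- below at the same key (same position); ported as inserting [] (exact for the returned dict)
      let dr := st.2.1.insert pd.1 []
      let st2 := (PySem.Dict.ofList pd.2).values.foldl (msgLoopA stop) (st.1, st.2.2)
      (st2.1, dr.insert pd.1 st2.2, []))
    ("", PySem.Dict.empty, [])
  st.2.1.items

-- ===== PORT B =====
def endsInf (palavra : String) : Bool :=
  PySem.Str.endswith palavra "ar" || PySem.Str.endswith palavra "er" ||
  PySem.Str.endswith palavra "ir" || PySem.Str.endswith palavra "or"

-- one word of the forward pass; state = (pendente, acoes)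
def wordStepB (stop : List String) (st : Option String × List String) (palavra : String) :
    Option String × List String :=
  if palavra ∈ stop then st
  else
    let st' := match st.1 with
      | some pendente => ((none : Option String), st.2 ++ [pendente ++ " " ++ palavra])
      | none => st
    if endsInf palavra then (some palavra, st'.2) else st'

def msgLoopB (stop : List String) (acoes : List String) (mensagem : String) : List String :=
  let st := (PySem.Str.split₀ mensagem).foldl (wordStepB stop) (none, acoes)
  match st.1 with
  | some pendente => st.2 ++ [pendente]
  | none => st.2

def detectar_acao_alt (dic : List (String × List (String × String))) (stop : List String) : List (String × List String) :=
  ((PySem.Dict.ofList dic).items.foldl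
    (fun (dr : PySem.Dict String (List String)) pd =>
      dr.insert pd.1 ((PySem.Dict.ofList pd.2).values.foldl (msgLoopB stop) []))
    PySem.Dict.empty).items

-- ===== PRECONDITION & SPEC =====
def Spec_detectar_acao (dic : List (String × List (String × String))) (stop : List String) (out : List (String × List String)) : Prop := out = detectar_acao_alt dic stop
instance (dic : List (String × List (String × String))) (stop : List String) (out : List (String × List String)) : Decidable (Spec_detectar_acao dic stop out) := by unfold Spec_detectar_acao; infer_instance

-- ===== CLAIM (what is proved, stated in full; the proofs are below) =====
def Claim_equal_detectar_acao : Prop := ∀ (dic : List (String × List (String × String))) (stop : List String), Dom_detectar_acao dic stop → Spec_detectar_acao dic stop (detectar_acao dic stop)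

-- ===== LEMMAS AND PROOFS =====

-- endsInf is exactly A's test "the last-two-character slice is in infinitivo"
theorem sufEq (w : String) :
    (PySem.Str.slice w (some (-2)) none ∈ infinitivoA) ↔ endsInf w = true := by
  have hsl : ∀ t : String, (PySem.Str.slice w (some (-2)) none = t) ↔
      (w.toList.drop (w.toList.length - 2) = t.toList) := by
    intro t
    rw [← String.toList_inj]
    simp [pysem]
  have drop2_iff : ∀ (cs t : List Char), t.length = 2 →
      ((cs.drop (cs.length - 2) = t) ↔ t <:+ cs) := by
    intro cs t ht
    rw [List.suffix_iff_eq_drop, ht, eq_comm]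
  simp only [infinitivoA, List.mem_cons, List.not_mem_nil, or_false, hsl,
    endsInf, Bool.or_eq_true, PySem.Str.endswith_eq, PySem.Chars.endswith_iff]
  constructor
  · rintro (h | h | h | h) <;>
    [exact Or.inl (Or.inl (Or.inl ((drop2_iff _ _ rfl).mp h)));
     exact Or.inl (Or.inl (Or.inr ((drop2_iff _ _ rfl).mp h)));
     exact Or.inl (Or.inr ((drop2_iff _ _ rfl).mp h));
     exact Or.inr ((drop2_iff _ _ rfl).mp h)]
  · rintro (((h | h) | h) | h) <;>
    [exact Or.inl ((drop2_iff _ _ rfl).mpr h);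
     exact Or.inr (Or.inl ((drop2_iff _ _ rfl).mpr h));
     exact Or.inr (Or.inr (Or.inl ((drop2_iff _ _ rfl).mpr h)));
     exact Or.inr (Or.inr (Or.inr ((drop2_iff _ _ rfl).mpr h)))]

-- the emissions of one message's interesting-word list (shared characterisation of both loops)
def emitA : List String → List String
  | [] => []
  | w :: rest =>
    (if endsInf w then [match rest with | [] => w | u :: _ => w ++ " " ++ u] else []) ++ emitA rest

-- A's index-loop body, re-indexed over Nat and phrased with endsInf
def bodyNat (lint : List String) (st : String × List String) (i : Nat) : String × List String :=
  if endsInf (lint.getD i "") then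
    let resp := if i + 1 ≠ lint.length then lint.getD i "" ++ " " ++ lint.getD (i + 1) "" else lint.getD i ""
    (resp, st.2 ++ [resp])
  else st

theorem idxLoopA_eq_bodyNat (lint : List String) (st : String × List String) :
    idxLoopA lint st = (List.range lint.length).foldl (bodyNat lint) st := by
  unfold idxLoopA
  rw [PySem.List.pyRange_one]
  simp only [sub_zero, Int.toNat_natCast, List.foldl_map]
  apply PySem.List.foldl_congr_mem
  intro acc i hi
  have hi' : i < lint.length := List.mem_range.mp hi
  have h0 : (0 : Int) + (i : Int) = (i : Int) := by omega
  have h1 : (i : Int) + 1 = ((i + 1 : Nat) : Int) := by push_cast; ring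
  have hcond : ((i : Int) ≠ (lint.length : Int) - 1) ↔ (i + 1 ≠ lint.length) := by omega
  simp only [bodyNat, h0, h1, PySem.List.pyGetD_natCast, sufEq, hcond]

theorem foldl_bodyNat_snd (lint : List String) (st : String × List String) :
    ((List.range lint.length).foldl (bodyNat lint) st).2 = st.2 ++ emitA lint := by
  induction lint generalizing st with
  | nil => simp [emitA]
  | cons w rest ih =>
    rw [List.length_cons, List.range_succ_eq_map]
    simp only [List.foldl_cons, List.foldl_map]
    have hshift : ∀ (st' : String × List String) (i : Nat),
        bodyNat (w :: rest) st' (i + 1) = bodyNat rest st' i := by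
      intro st' i
      simp only [bodyNat, List.getD_cons_succ, List.length_cons, ne_eq, Nat.add_left_inj]
    simp only [hshift]
    rw [ih]
    rcases hre : endsInf w with _ | _ <;> rcases rest with _ | ⟨u, rest'⟩ <;>
      simp [bodyNat, emitA, hre, List.append_assoc]

def emitMsg (stop : List String) (m : String) : List String :=
  emitA ((PySem.Str.split₀ m).filter (fun w => decide (w ∉ stop)))

theorem msgLoopA_snd (stop : List String) (st : String × List String) (m : String) :
    (msgLoopA stop st m).2 = st.2 ++ emitMsg stop m := by
  unfold msgLoopA
  have h : ((PySem.Str.split₀ m).foldl (fun acc w => if w ∉ stop then acc ++ [w] else acc) ([] : List String))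
      = (PySem.Str.split₀ m).filter (fun w => decide (w ∉ stop)) := by
    rw [PySem.List.foldl_congr_mem _ _
      (fun acc w => if (fun w => decide (w ∉ stop)) w = true then acc ++ [id w] else acc) _
      (by intro acc w _; simp)]
    rw [PySem.List.foldl_append_if]
    simp
  simp only [h, idxLoopA_eq_bodyNat, foldl_bodyNat_snd]
  rfl

-- B's flush of the final machine state
def flushB (st : Option String × List String) : List String :=
  match st.1 with
  | some p => st.2 ++ [p]
  | none => st.2

-- what a pending verb will emit given the remaining interesting words
def pendEmit (p? : Option String) (lint : List String) : List String :=
  match p? with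
  | none => []
  | some p => match lint with | [] => [p] | u :: _ => [p ++ " " ++ u]

theorem machineB (stop : List String) (lint : List String) (p? : Option String) (acc : List String)
    (h : ∀ w ∈ lint, w ∉ stop) :
    flushB (lint.foldl (wordStepB stop) (p?, acc)) = acc ++ pendEmit p? lint ++ emitA lint := by
  induction lint generalizing p? acc with
  | nil => cases p? <;> simp [flushB, pendEmit, emitA]
  | cons w rest ih =>
    have hw : w ∉ stop := h w (List.mem_cons_self ..)
    have hr : ∀ x ∈ rest, x ∉ stop := fun x hx => h x (List.mem_cons_of_mem _ hx)
    rw [List.foldl_cons]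
    rcases p? with _ | p <;> rcases hre : endsInf w with _ | _ <;>
      simp only [wordStepB, if_neg hw, hre, Bool.false_eq_true, if_false, if_true] <;>
      rw [ih _ _ hr] <;>
      rcases rest with _ | ⟨u, rest'⟩ <;>
      simp [pendEmit, emitA, hre]

theorem foldl_wordStepB_filter (stop : List String) (ws : List String) (st : Option String × List String) :
    ws.foldl (wordStepB stop) st = (ws.filter (fun w => decide (w ∉ stop))).foldl (wordStepB stop) st := by
  induction ws generalizing st with
  | nil => rfl
  | cons w rest ih =>
    by_cases hw : w ∈ stop
    · simp [hw, wordStepB, ih]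
    · simp [hw, ih]

theorem msgLoopB_eq (stop : List String) (acc : List String) (m : String) :
    msgLoopB stop acc m = acc ++ emitMsg stop m := by
  have h0 : msgLoopB stop acc m = flushB ((PySem.Str.split₀ m).foldl (wordStepB stop) (none, acc)) := rfl
  rw [h0, foldl_wordStepB_filter, machineB]
  · simp [pendEmit, emitMsg]
  · intro w hw
    have := List.of_mem_filter hw
    simpa using this

-- the list of actions of one person (pd = (person, inner dict as a list))
def perPerson (stop : List String) (pd : String × List (String × String)) : List String :=
  (PySem.Dict.ofList pd.2).values.foldl (fun acc m => acc ++ emitMsg stop m) []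

theorem msgsA_snd (stop : List String) (msgs : List String) (st : String × List String) :
    (msgs.foldl (msgLoopA stop) st).2 = msgs.foldl (fun acc m => acc ++ emitMsg stop m) st.2 := by
  induction msgs generalizing st with
  | nil => rfl
  | cons m rest ih =>
    rw [List.foldl_cons, List.foldl_cons, ih, msgLoopA_snd]

theorem msgsB (stop : List String) (msgs : List String) (acc : List String) :
    msgs.foldl (msgLoopB stop) acc = msgs.foldl (fun acc m => acc ++ emitMsg stop m) acc := by
  apply PySem.List.foldl_congr_mem
  intro acc m _
  exact msgLoopB_eq stop acc m

theorem outerA (stop : List String) (items : List (String × List (String × String)))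
    (resp : String) (dr : PySem.Dict String (List String)) :
    (items.foldl
      (fun (st : String × PySem.Dict String (List String) × List String) pd =>
        (((PySem.Dict.ofList pd.2).values.foldl (msgLoopA stop) (st.1, st.2.2)).1,
         (st.2.1.insert pd.1 []).insert pd.1
           (((PySem.Dict.ofList pd.2).values.foldl (msgLoopA stop) (st.1, st.2.2)).2),
         []))
      (resp, dr, [])).2.1
    = items.foldl (fun dr pd => dr.insert pd.1 (perPerson stop pd)) dr := by
  induction items generalizing resp dr with
  | nil => rfl
  | cons pd rest ih =>
    rw [List.foldl_cons, List.foldl_cons]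
    have h2 : (((PySem.Dict.ofList pd.2).values.foldl (msgLoopA stop) (resp, ([] : List String))).2)
        = perPerson stop pd := by
      rw [msgsA_snd]; rfl
    exact (ih _ _).trans (by rw [h2, PySem.Dict.insert_insert_self])

-- ===== VERDICT (by name: the statement is the Claim_ definition above) =====
theorem detectar_acao_spec : Claim_equal_detectar_acao := by
  intro dic stop _
  show detectar_acao dic stop = detectar_acao_alt dic stop
  have hB : (fun (dr : PySem.Dict String (List String)) (pd : String × List (String × String)) =>
      dr.insert pd.1 ((PySem.Dict.ofList pd.2).values.foldl (msgLoopB stop) [])) =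
      (fun dr pd => dr.insert pd.1 (perPerson stop pd)) := by
    funext dr pd
    rw [msgsB]
    rfl
  simp only [detectar_acao, detectar_acao_alt, hB]
  rw [outerA]
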